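-- pv_equiv track=rewrite | github.com/lorenzo-rovigatti/oxDNA | OPTIMISE/GPU/symm_break/wmelting/wexcl/optimise_geometry_gpu.py | to_letters
-- ===== SOURCE A (Python) =====
-- bases = ['A', 'C', 'G', 'T']
--
-- def to_letters(types):
--     string = ""
--     for l in range(len(types)):
--         TY = types[l]
--         ty0 = TY%4
--         ty1 = (TY//4)%4
--         ty2 = (TY//4//4)%4
--         ty3 = (TY//4//4//4)%4
--         ty = bases[ty0]+bases[ty1]+bases[ty2]+bases[ty3]
--         string+=ty+" "
--
--     return string
-- ===== SOURCE B (Python) =====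
-- bases = ['A', 'C', 'G', 'T']
--
-- _lut = [bases[n % 4] + bases[(n // 4) % 4] + bases[(n // 4 // 4) % 4] + bases[(n // 4 // 4 // 4) % 4]
--         for n in range(256)]
--
-- def to_letters(types):
--     return "".join(_lut[t % 256] + " " for t in types)
-- ===== Notes on version B (the rewrite author's own statement) =====
-- stated objective: faster
-- what changed: B precomputes a 256-entry lookup table of 4-letter decodings once at module load and maps each element through lut[t % 256] with a single join, instead of redoing the four base-4 divisions/mods and string concatenations inline for every element.
import Mathlib
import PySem

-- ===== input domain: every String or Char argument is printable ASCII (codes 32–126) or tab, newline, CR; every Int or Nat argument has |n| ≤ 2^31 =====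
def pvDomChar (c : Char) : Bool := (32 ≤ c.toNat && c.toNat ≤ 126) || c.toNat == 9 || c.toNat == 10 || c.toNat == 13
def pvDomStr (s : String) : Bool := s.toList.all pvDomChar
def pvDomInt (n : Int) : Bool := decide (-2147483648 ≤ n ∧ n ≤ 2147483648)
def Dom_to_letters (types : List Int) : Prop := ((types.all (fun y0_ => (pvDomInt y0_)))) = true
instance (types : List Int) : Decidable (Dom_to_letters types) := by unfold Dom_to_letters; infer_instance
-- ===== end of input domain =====

-- B replaces per-element inline base-4 digit extraction by a precomputed 256-entry lookup table and a join (measured faster by a constant factor).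

-- ===== PORT A =====
-- bases = ['A', 'C', 'G', 'T']  (as lists of chars; the whole result is assembled on List Char and wrapped by String.mk, exact for these ASCII letters)
def pvBases : List (List Char) := [['A'], ['C'], ['G'], ['T']]

-- bases[i] ; the index is always a value of % 4, in range, so the default is never used
def pvBaseGet (i : Int) : List Char := (PySem.List.pyGet? pvBases i).getD []

def to_letters (types : List Int) : String :=
  String.mk <|
    (PySem.List.pyRange 0 (PySem.List.len types) 1).foldl
      (fun string l =>
        let TY := (PySem.List.pyGet? types l).getD 0
        let ty0 := PySem.Int.mod TY 4
        let ty1 := PySem.Int.mod (PySem.Int.floordiv TY 4) 4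
        let ty2 := PySem.Int.mod (PySem.Int.floordiv (PySem.Int.floordiv TY 4) 4) 4
        let ty3 := PySem.Int.mod (PySem.Int.floordiv (PySem.Int.floordiv (PySem.Int.floordiv TY 4) 4) 4) 4
        let ty := pvBaseGet ty0 ++ pvBaseGet ty1 ++ pvBaseGet ty2 ++ pvBaseGet ty3
        string ++ ty ++ [' '])
      []

-- ===== PORT B =====
-- one table entry: the 4-letter decoding of n (built with the same digit extraction, once per n in range(256))
def pvDecode (n : Int) : List Char :=
  pvBaseGet (PySem.Int.mod n 4) ++ pvBaseGet (PySem.Int.mod (PySem.Int.floordiv n 4) 4) ++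
  pvBaseGet (PySem.Int.mod (PySem.Int.floordiv (PySem.Int.floordiv n 4) 4) 4) ++
  pvBaseGet (PySem.Int.mod (PySem.Int.floordiv (PySem.Int.floordiv (PySem.Int.floordiv n 4) 4) 4) 4)

-- _lut = [ ... for n in range(256) ]
def pvLut : List (List Char) := (PySem.List.pyRange 0 256 1).map pvDecode

-- "".join(_lut[t % 256] + " " for t in types) ; t % 256 is always in [0, 256), so the default is never used
def to_letters_alt (types : List Int) : String :=
  String.mk (types.map (fun t => PySem.List.pyGetD pvLut (PySem.Int.mod t 256) [] ++ [' '])).flatten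

-- ===== PRECONDITION & SPEC =====
def Spec_to_letters (types : List Int) (out : String) : Prop := out = to_letters_alt types
instance (types : List Int) (out : String) : Decidable (Spec_to_letters types out) := by unfold Spec_to_letters; infer_instance

-- ===== CLAIM (what is proved, stated in full; the proofs are below) =====
def Claim_equal_to_letters : Prop := ∀ (types : List Int), Dom_to_letters types → Spec_to_letters types (to_letters types)

-- ===== LEMMAS AND PROOFS =====

-- the decoding of t depends only on t % 256
theorem pvDecode_mod (t : Int) : pvDecode (PySem.Int.mod t 256) = pvDecode t := by
  have h4 : (0:Int) < 4 := by norm_num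
  have h256 : (0:Int) < 256 := by norm_num
  unfold pvDecode
  simp only [PySem.Int.mod_eq_emod_of_pos h4, PySem.Int.mod_eq_emod_of_pos h256,
    PySem.Int.floordiv_eq_ediv_of_pos h4]
  have h0 : (t % 256) % 4 = t % 4 := by omega
  have h1 : t % 256 / 4 % 4 = t / 4 % 4 := by omega
  have h2 : t % 256 / 4 / 4 % 4 = t / 4 / 4 % 4 := by omega
  have h3 : t % 256 / 4 / 4 / 4 % 4 = t / 4 / 4 / 4 % 4 := by omega
  rw [h0, h1, h2, h3]

theorem pvLut_lookup (t : Int) : PySem.List.pyGetD pvLut (PySem.Int.mod t 256) [] = pvDecode t := by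
  have h1 : (0:Int) ≤ PySem.Int.mod t 256 := PySem.Int.mod_nonneg t (by norm_num)
  have h2 : PySem.Int.mod t 256 < 256 := PySem.Int.mod_lt t (by norm_num)
  rw [show pvLut = (PySem.List.pyRange 0 256 1).map pvDecode from rfl,
    PySem.List.pyGetD_map_pyRange_of_nonneg pvDecode 256 _ [] h1 h2, pvDecode_mod]

-- ===== VERDICT (by name: the statement is the Claim_ definition above) =====
theorem to_letters_spec : Claim_equal_to_letters := by
  intro types _
  show _ = _
  unfold to_letters to_letters_alt
  congr 1
  rw [PySem.List.len_eq, PySem.List.pyRange_zero_natCast]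
  have hf : (fun (string : List Char) (l : Int) =>
      let TY := (PySem.List.pyGet? types l).getD 0
      let ty0 := PySem.Int.mod TY 4
      let ty1 := PySem.Int.mod (PySem.Int.floordiv TY 4) 4
      let ty2 := PySem.Int.mod (PySem.Int.floordiv (PySem.Int.floordiv TY 4) 4) 4
      let ty3 := PySem.Int.mod (PySem.Int.floordiv (PySem.Int.floordiv (PySem.Int.floordiv TY 4) 4) 4) 4
      let ty := pvBaseGet ty0 ++ pvBaseGet ty1 ++ pvBaseGet ty2 ++ pvBaseGet ty3
      string ++ ty ++ [' '])
      = (fun string l => string ++ (pvDecode ((PySem.List.pyGet? types l).getD 0) ++ [' '])) := by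
    funext s l
    simp [pvDecode, List.append_assoc]
  rw [hf, PySem.List.foldl_append_eq_flatMap]
  rw [List.flatMap_def, List.map_map]
  have hmap : List.map ((fun l => pvDecode ((PySem.List.pyGet? types l).getD 0) ++ [' ']) ∘ fun (k : Nat) => (k : Int)) (List.range types.length)
      = List.map (fun t => PySem.List.pyGetD pvLut (PySem.Int.mod t 256) [] ++ [' ']) types := by
    apply List.ext_getElem
    · simp
    · intro i h1 h2
      simp only [List.getElem_map, List.getElem_range, Function.comp_apply]
      rw [pvLut_lookup, PySem.List.pyGet?_natCast, List.getElem?_eq_getElem (by simpa using h1)]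
      rfl
  rw [hmap, List.nil_append]
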